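-- pv_equiv track=rewrite | github.com/Luminiscental/AdventOfCode2019 | day25.py | values_after
-- ===== SOURCE A (Python) =====
-- def values_after(header, lines):
--     """Get values after a header in a bullet list."""
--     values = []
--     if header in lines:
--         start = lines.index(header) + 1
--         for line in lines[start:]:
--             if not line:
--                 break
--             values.append(line[2:])  # skip the "- " characters
--     return values
-- ===== SOURCE B (Python) =====
-- def values_after(header, lines):
--     """Get values after a header in a bullet list."""
--     out = []
--     started = False
--     for line in lines:
--         if started:
--             if not line:
--                 break
--             out.append(line[2:])
--         elif line == header:
--             started = True
--     return out
-- ===== Notes on version B (the rewrite author's own statement) =====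
-- stated objective: simpler
-- what changed: B replaces the membership test + .index + slice-then-collect of A by a single pass over lines with a started flag, so lines is traversed once instead of up to three times.
import Mathlib
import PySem

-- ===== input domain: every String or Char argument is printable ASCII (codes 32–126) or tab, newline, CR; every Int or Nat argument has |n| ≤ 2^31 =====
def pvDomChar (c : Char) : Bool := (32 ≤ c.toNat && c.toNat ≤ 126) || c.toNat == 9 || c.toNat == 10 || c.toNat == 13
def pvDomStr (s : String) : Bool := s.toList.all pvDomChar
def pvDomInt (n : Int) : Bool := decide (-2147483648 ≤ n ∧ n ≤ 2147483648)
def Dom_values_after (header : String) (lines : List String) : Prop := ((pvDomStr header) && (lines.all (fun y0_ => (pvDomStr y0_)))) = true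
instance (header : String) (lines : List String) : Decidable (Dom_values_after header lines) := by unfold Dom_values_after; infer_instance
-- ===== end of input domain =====

-- B: single pass with a 'started' flag instead of A's membership test + .index + slice; return-value equivalence, proved total.
-- ===== PORT A =====
-- the for-with-break collecting line[2:] until the first falsy line
def pvCollectA : List String → List String
  | [] => []
  | l :: ls => if l = "" then [] else PySem.Str.slice l (some 2) none :: pvCollectA ls

def values_after (header : String) (lines : List String) : List String :=
  if lines.contains header then
    match PySem.List.index? lines header with
    | some i => pvCollectA (PySem.List.slice lines (some ((i : Int) + 1)) none)
    | none => []   -- unreachable: guarded by the membership test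
  else []

-- ===== PORT B =====
-- the single loop of Source B: 'started' is the flag, the break becomes returning the accumulated prefix
def pvGoB (header : String) : Bool → List String → List String
  | _, [] => []
  | true, l :: ls => if l = "" then [] else PySem.Str.slice l (some 2) none :: pvGoB header true ls
  | false, l :: ls => if l = header then pvGoB header true ls else pvGoB header false ls

def values_after_alt (header : String) (lines : List String) : List String :=
  pvGoB header false lines

-- ===== PRECONDITION & SPEC =====
def Spec_values_after (header : String) (lines : List String) (out : List String) : Prop := out = values_after_alt header lines
instance (header : String) (lines : List String) (out : List String) : Decidable (Spec_values_after header lines out) := by unfold Spec_values_after; infer_instance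

-- ===== CLAIM (what is proved, stated in full; the proofs are below) =====
def Claim_equal_values_after : Prop := ∀ (header : String) (lines : List String), Dom_values_after header lines → Spec_values_after header lines (values_after header lines)

-- ===== LEMMAS AND PROOFS =====

-- ===== VERDICT (by name: the statement is the Claim_ definition above) =====
theorem pvGoB_true (header : String) (ls : List String) :
    pvGoB header true ls = pvCollectA ls := by
  induction ls with
  | nil => rfl
  | cons l ls ih => simp [pvGoB, pvCollectA, ih]

theorem pv_eq (header : String) (lines : List String) :
    values_after header lines = values_after_alt header lines := by
  induction lines with
  | nil => rfl
  | cons l ls ih =>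
    by_cases hl : l = header
    · subst hl
      have hc : (l :: ls).contains l = true := by simp
      simp only [values_after, values_after_alt, pvGoB, if_pos hc,
        PySem.List.index?_cons_self, pvGoB_true]
      rw [show ((0 : Nat) : Int) + 1 = ((1 : Nat) : Int) by norm_num,
        PySem.List.slice_from_natCast]
      rfl
    · have hB : values_after_alt header (l :: ls) = values_after_alt header ls := by
        simp [values_after_alt, pvGoB, hl]
      rw [hB, ← ih]
      by_cases hm : header ∈ ls
      · obtain ⟨i, hi⟩ := Option.isSome_iff_exists.1 ((PySem.List.index?_isSome_iff ls header).2 hm)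
        obtain ⟨pre, suf, hsplit, hlen, hpre⟩ := (PySem.List.index?_eq_some_iff ls header i).1 hi
        have hcons : PySem.List.index? (l :: ls) header = some (i + 1) := by
          refine (PySem.List.index?_eq_some_iff (l :: ls) header (i + 1)).2
            ⟨l :: pre, suf, by rw [hsplit]; rfl, by simp [hlen], ?_⟩
          simp only [List.mem_cons, not_or]
          exact ⟨fun h => hl h.symm, hpre⟩
        have hc1 : (l :: ls).contains header = true := by simp [hm]
        have hc2 : ls.contains header = true := by simp [hm]
        have h1 : ((i + 1 : Nat) : Int) + 1 = ((i + 2 : Nat) : Int) := by push_cast; ring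
        have h2 : ((i : Nat) : Int) + 1 = ((i + 1 : Nat) : Int) := by push_cast; ring
        have key : PySem.List.slice (l :: ls) (some (((i + 1 : Nat) : Int) + 1)) none
            = PySem.List.slice ls (some (((i : Nat) : Int) + 1)) none := by
          rw [h1, h2, PySem.List.slice_from_natCast, PySem.List.slice_from_natCast,
            List.drop_succ_cons]
        rw [values_after, values_after, if_pos hc1, if_pos hc2, hcons, hi]
        simp only [key]
      · have hnm : header ∉ l :: ls := by
          simp only [List.mem_cons, not_or]
          exact ⟨fun h => hl h.symm, hm⟩
        rw [values_after, values_after,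
          if_neg (by simp only [List.contains_eq_mem, decide_eq_true_eq]; exact hnm),
          if_neg (by simp only [List.contains_eq_mem, decide_eq_true_eq]; exact hm)]

theorem values_after_spec : Claim_equal_values_after := by
  intro header lines _
  unfold Spec_values_after
  exact pv_eq header lines
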